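-- pv_equiv track=rewrite | github.com/gh0stintheshe11/LeetCode-Solutions | solutions/2892.minimizing-array-after-replacing-pairs-with-their-product/Python3.py | minArrayLength
-- ===== SOURCE A (Python) =====
-- from typing import List
--
-- def minArrayLength(nums: List[int], k: int) -> int:
--     n = len(nums)
--
--     if 0 in nums:
--         return 1
--
--     i = 0
--     min_length = n
--
--     while i < n:
--         j = i + 1
--         product = nums[i]
--         while j < n:
--             if product * nums[j] > k:
--                 break
--             product *= nums[j]
--             j += 1
--         min_length -= (j - i - 1)
--         i = j
--
--     return min_length
-- ===== SOURCE B (Python) =====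
-- def minArrayLength(nums, k):
--     if 0 in nums:
--         return 1
--     if not nums:
--         return 0
--     # stage 1: prefix products (all elements nonzero here, so division below is exact)
--     P = [1]
--     for x in nums:
--         P.append(P[-1] * x)
--     # stage 2: segment product from the anchor is P[j+1] // base (exact division);
--     # walk the adjacent prefix-product pairs, cutting when it exceeds k
--     count, base = 1, 1
--     for pj, pj1 in zip(P[1:], P[2:]):
--         if pj1 // base > k:
--             count += 1
--             base = pj
--     return count
-- ===== Notes on version B (the rewrite author's own statement) =====
-- stated objective: alternative
-- what changed: B replaces A's nested while-loops carrying a running product with a two-stage algorithm: first materialize the prefix-product table P (valid since the zero guard leaves only nonzero elements), then count cuts by scanning adjacent prefix-product pairs and testing the segment product via exact division P[j+1] // base against k.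
import Mathlib
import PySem

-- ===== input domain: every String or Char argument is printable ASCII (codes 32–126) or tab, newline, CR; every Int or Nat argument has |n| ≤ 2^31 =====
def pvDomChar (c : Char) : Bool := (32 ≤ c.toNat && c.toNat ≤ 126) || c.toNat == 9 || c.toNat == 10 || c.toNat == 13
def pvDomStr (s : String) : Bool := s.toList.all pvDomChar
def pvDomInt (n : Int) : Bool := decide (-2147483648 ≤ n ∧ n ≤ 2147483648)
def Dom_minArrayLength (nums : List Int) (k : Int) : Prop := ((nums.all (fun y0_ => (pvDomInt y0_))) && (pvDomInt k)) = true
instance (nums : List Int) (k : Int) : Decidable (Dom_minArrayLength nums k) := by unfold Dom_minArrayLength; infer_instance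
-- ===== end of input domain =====

-- B replaces A's nested-loop running-product greedy by a two-stage algorithm (prefix-product table, then a
-- cut-counting scan using exact division); equal return value proved, no speed claim.

-- ===== PORT A =====
-- inner while loop of A: consume elements while product*nums[j] <= k; returns (j - i - 1, remaining suffix)
def pvAInner (k product : Int) : List Int → Nat × List Int
  | [] => (0, [])
  | x :: rest =>
    if product * x > k then (0, x :: rest)
    else
      let pr := pvAInner k (product * x) rest
      (pr.1 + 1, pr.2)

-- needed for termination of the outer loop
theorem pvAInner_len (k product : Int) (l : List Int) : (pvAInner k product l).2.length ≤ l.length := by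
  induction l generalizing product with
  | nil => simp [pvAInner]
  | cons x rest ih =>
    simp only [pvAInner]
    split
    · simp
    · exact le_trans (ih _) (Nat.le_succ _)

-- outer while loop of A over (remaining list, min_length)
def pvAOuter (k : Int) : List Int → Int → Int
  | [], ml => ml
  | x :: rest, ml =>
    let pr := pvAInner k x rest
    pvAOuter k pr.2 (ml - pr.1)
termination_by l _ => l.length
decreasing_by exact Nat.lt_succ_of_le (pvAInner_len k x rest)

def minArrayLength (nums : List Int) (k : Int) : Int :=
  if nums.contains 0 then 1
  else pvAOuter k nums (nums.length : Int)

-- ===== PORT B =====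
-- stage 1 of B: the appended part of the prefix-product list P ('for x in nums: P.append(P[-1]*x)')
def pvPrefix : List Int → Int → List Int
  | [], _ => []
  | x :: rest, last => (last * x) :: pvPrefix rest (last * x)

-- stage 2 of B: scan adjacent prefix-product pairs (P[j], P[j+1]) with state (count, base)
def pvBScan (k : Int) : List (Int × Int) → Int → Int → Int
  | [], count, _ => count
  | (pj, pj1) :: rest, count, base =>
    if PySem.Int.floordiv pj1 base > k then pvBScan k rest (count + 1) pj
    else pvBScan k rest count base

def minArrayLength_alt (nums : List Int) (k : Int) : Int :=
  if nums.contains 0 then 1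
  else
    match nums with
    | [] => 0
    | _ :: _ =>
      let P := 1 :: pvPrefix nums 1
      pvBScan k (List.zip (P.drop 1) (P.drop 2)) 1 1

-- ===== PRECONDITION & SPEC =====
def Spec_minArrayLength (nums : List Int) (k : Int) (out : Int) : Prop := out = minArrayLength_alt nums k
instance (nums : List Int) (k : Int) (out : Int) : Decidable (Spec_minArrayLength nums k out) := by unfold Spec_minArrayLength; infer_instance

-- ===== CLAIM (what is proved, stated in full; the proofs are below) =====
def Claim_equal_minArrayLength : Prop := ∀ (nums : List Int) (k : Int), Dom_minArrayLength nums k → Spec_minArrayLength nums k (minArrayLength nums k)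

-- ===== LEMMAS AND PROOFS =====

-- proof-side intermediate: the flat running-product segment-counting pass
def pvBGo (k product count : Int) : List Int → Int
  | [] => count
  | x :: rest =>
    if product * x > k then pvBGo k x (count + 1) rest
    else pvBGo k (product * x) count rest

-- A's outer loop on x::rest with min_length ml equals the flat pass with product x and count (ml - rest.length)
theorem pvKey (k : Int) (rest : List Int) (x ml : Int) :
    pvAOuter k (x :: rest) ml = pvBGo k x (ml - rest.length) rest := by
  induction rest generalizing x ml with
  | nil => simp [pvAOuter, pvAInner, pvBGo]
  | cons y t ih =>
    by_cases h : x * y > k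
    · have hA : pvAOuter k (x :: y :: t) ml = pvAOuter k (y :: t) ml := by
        simp only [pvAOuter, pvAInner, if_pos h]
        norm_num
      rw [hA, ih y ml]
      simp only [pvBGo, if_pos h, List.length_cons]
      congr 1
      push_cast
      ring
    · have hA : pvAOuter k (x :: y :: t) ml = pvAOuter k ((x * y) :: t) (ml - 1) := by
        simp only [pvAOuter, pvAInner, if_neg h]
        congr 1
        push_cast
        ring
      rw [hA, ih (x * y) (ml - 1)]
      simp only [pvBGo, if_neg h, List.length_cons]
      congr 1
      push_cast
      ring

-- exact division: Python's // agrees with Lean's Int division when the divisor divides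
theorem pvFloordivExact (a b : Int) (hb : b ≠ 0) (h : b ∣ a) :
    PySem.Int.floordiv a b = a / b := by
  have hm : PySem.Int.mod a b = 0 := (PySem.Int.mod_eq_zero_iff_dvd a b).mpr h
  have := PySem.Int.floordiv_mul_add_mod a b
  rw [hm, add_zero] at this
  exact (Int.ediv_eq_of_eq_mul_left hb this.symm).symm

-- B's scan over the zipped prefix products equals the flat running-product pass
theorem pvScanEq (k : Int) (rest : List Int) (p base count : Int)
    (hb : base ≠ 0) (hp : p ≠ 0) (hdvd : base ∣ p) (hr : ∀ y ∈ rest, y ≠ 0) :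
    pvBScan k (List.zip (p :: pvPrefix rest p) (pvPrefix rest p)) count base
      = pvBGo k (p / base) count rest := by
  induction rest generalizing p base count with
  | nil => simp [pvPrefix, pvBScan, pvBGo]
  | cons y t ih =>
    have hy : y ≠ 0 := hr y (by simp)
    have ht : ∀ z ∈ t, z ≠ 0 := fun z hz => hr z (by simp [hz])
    have hpy : p * y ≠ 0 := mul_ne_zero hp hy
    have hdiv : PySem.Int.floordiv (p * y) base = p / base * y := by
      rw [pvFloordivExact (p * y) base hb (Dvd.dvd.mul_right hdvd y)]
      rw [mul_comm p y, Int.mul_ediv_assoc y hdvd, mul_comm]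
    have heq : (p * y) / base = p / base * y := by
      rw [mul_comm p y, Int.mul_ediv_assoc y hdvd, mul_comm]
    simp only [pvPrefix, List.zip_cons_cons, pvBScan, pvBGo, hdiv]
    by_cases h : p / base * y > k
    · rw [if_pos h, if_pos h,
        ih (p * y) p (count + 1) hp hpy (Dvd.dvd.mul_right dvd_rfl y) ht,
        Int.mul_ediv_cancel_left y hp]
    · rw [if_neg h, if_neg h,
        ih (p * y) base count hb hpy (Dvd.dvd.mul_right hdvd y) ht, heq]

-- no zero in the list means every element is nonzero
theorem pvNoZero (nums : List Int) (h : nums.contains 0 = false) : ∀ y ∈ nums, y ≠ 0 := by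
  intro y hy hy0
  subst hy0
  simp only [List.contains_eq_mem, decide_eq_false_iff_not] at h
  exact h hy

-- ===== VERDICT (by name: the statement is the Claim_ definition above) =====
theorem minArrayLength_spec : Claim_equal_minArrayLength := by
  unfold Claim_equal_minArrayLength
  intro nums k _
  unfold Spec_minArrayLength minArrayLength minArrayLength_alt
  by_cases h : nums.contains 0 = true
  · rw [if_pos h, if_pos h]
  · have hf : nums.contains 0 = false := by simpa using h
    rw [if_neg h, if_neg h]
    cases nums with
    | nil => simp [pvAOuter]
    | cons x rest =>
      have hnz := pvNoZero (x :: rest) hf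
      have hx : x ≠ 0 := hnz x (by simp)
      have hrest : ∀ y ∈ rest, y ≠ 0 := fun y hy => hnz y (by simp [hy])
      have hdrop : ((1 : Int) :: pvPrefix (x :: rest) 1).drop 2 = pvPrefix rest (1 * x) := by
        simp [pvPrefix]
      have hB : pvBScan k (List.zip (((1 : Int) :: pvPrefix (x :: rest) 1).drop 1)
            (((1 : Int) :: pvPrefix (x :: rest) 1).drop 2)) 1 1 = pvBGo k x 1 rest := by
        rw [hdrop]
        show pvBScan k (List.zip (pvPrefix (x :: rest) 1) (pvPrefix rest (1 * x))) 1 1 = _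
        have : pvPrefix (x :: rest) 1 = (1 * x) :: pvPrefix rest (1 * x) := by
          simp [pvPrefix]
        rw [this, pvScanEq k rest (1 * x) 1 1 one_ne_zero (by simpa using hx) (one_dvd _) hrest]
        simp
      rw [pvKey k rest x ((x :: rest).length : Int)]
      simp only [List.length_cons]
      rw [hB]
      congr 1
      push_cast
      ring
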